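-- pv_equiv track=rewrite | github.com/zcgu/leetcode | codes/363. Max Sum of Rectangle No Larger Than K.py | helper
-- ===== SOURCE A (Python) =====
-- def helper(lst, k):
--     res = -2 ** 31
--
--     sums = [0]
--     cursum = 0
--
--     for num in lst:
--         cursum += num
--
--         from bisect import bisect_left, insort
--
--         index = bisect_left(sums, cursum - k)
--         if index < len(sums):
--             res = max(res, cursum - sums[index])
--         # print sums, cursum, num - k, index
--
--         index = bisect_left(sums, cursum)
--         sums.insert(index, cursum)
--     return res
-- ===== SOURCE B (Python) =====
-- def helper(lst, k):
--     res = -2 ** 31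
--     for i in range(len(lst)):
--         s = 0
--         for x in lst[i:]:
--             s += x
--             if s <= k:
--                 res = max(res, s)
--     return res
-- ===== Notes on version B (the rewrite author's own statement) =====
-- stated objective: simpler
-- what changed: Replaces the sorted-prefix-sum list with bisect insertion/search by a plain double loop over all non-empty subarrays keeping a running sum and taking the max of sums <= k.
import Mathlib
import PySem

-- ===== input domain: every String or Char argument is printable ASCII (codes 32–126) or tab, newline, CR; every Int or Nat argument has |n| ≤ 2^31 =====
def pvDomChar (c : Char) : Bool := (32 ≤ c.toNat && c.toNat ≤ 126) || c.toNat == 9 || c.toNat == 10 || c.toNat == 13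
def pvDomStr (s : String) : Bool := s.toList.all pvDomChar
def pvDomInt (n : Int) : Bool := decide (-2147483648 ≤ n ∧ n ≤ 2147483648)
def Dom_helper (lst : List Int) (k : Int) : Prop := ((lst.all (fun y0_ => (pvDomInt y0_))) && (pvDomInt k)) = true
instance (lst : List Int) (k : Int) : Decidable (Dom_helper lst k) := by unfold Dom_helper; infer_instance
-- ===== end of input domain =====

-- B replaces A's sorted-prefix-sum list with bisect search/insert by a plain double
-- scan over all non-empty subarrays (simpler; same quadratic cost).

-- ===== PORT A =====
-- one loop iteration of A; state is (res, sums, cursum)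
def helperStep (k : Int) (st : Int × List Int × Int) (num : Int) : Int × List Int × Int :=
  let cursum := st.2.2 + num
  let sums := st.2.1
  let i1 := PySem.List.bisectLeft sums (cursum - k)
  let res := if i1 < sums.length then max st.1 (cursum - sums.getD i1 0) else st.1
  let i2 := PySem.List.bisectLeft sums cursum
  (res, PySem.List.insert sums (i2 : Int) cursum, cursum)

def helper (lst : List Int) (k : Int) : Int :=
  (lst.foldl (helperStep k) (-2 ^ 31, [0], 0)).1

-- ===== PORT B =====
-- inner loop of B: running sum s over lst[i:], res updated when s ≤ k
def helperAltInner (k : Int) (p : Int × Int) (x : Int) : Int × Int :=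
  let s := p.2 + x
  (if s ≤ k then max p.1 s else p.1, s)

-- lst[i:] with 0 ≤ i ≤ len is List.drop i (PySem.List.slice_from)
def helper_alt (lst : List Int) (k : Int) : Int :=
  (List.range lst.length).foldl
    (fun res i => ((lst.drop i).foldl (helperAltInner k) (res, 0)).1)
    (-2 ^ 31)

-- ===== PRECONDITION & SPEC =====
def Spec_helper (lst : List Int) (k : Int) (out : Int) : Prop := out = helper_alt lst k
instance (lst : List Int) (k : Int) (out : Int) : Decidable (Spec_helper lst k out) := by unfold Spec_helper; infer_instance

-- ===== CLAIM (what is proved, stated in full; the proofs are below) =====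
def Claim_equal_helper : Prop := ∀ (lst : List Int) (k : Int), Dom_helper lst k → Spec_helper lst k (helper lst k)

-- ===== LEMMAS AND PROOFS =====

-- prefix sum of the first m elements
def pfx (lst : List Int) (m : Nat) : Int := (lst.take m).sum

-- the characterization both programs satisfy after all n elements:
-- res is reachable (either the initial -2^31 or some subarray sum ≤ k) and
-- bounds every subarray sum ≤ k with end index ≤ m
def Reach (lst : List Int) (k : Int) (m : Nat) (res : Int) : Prop :=
  (res = -2 ^ 31 ∨ (res ≤ k ∧ ∃ i j : Nat, i < j ∧ j ≤ m ∧ res = pfx lst j - pfx lst i)) ∧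
  (-2 ^ 31 ≤ res) ∧
  (∀ i j : Nat, i < j → j ≤ m → pfx lst j - pfx lst i ≤ k → pfx lst j - pfx lst i ≤ res)

theorem reach_unique {lst : List Int} {k : Int} {n : Nat} {r1 r2 : Int}
    (h1 : Reach lst k n r1) (h2 : Reach lst k n r2) : r1 = r2 := by
  obtain ⟨a1, b1, c1⟩ := h1
  obtain ⟨a2, b2, c2⟩ := h2
  have le12 : r1 ≤ r2 := by
    rcases a1 with h | ⟨hk, i, j, hij, hjn, he⟩
    · omega
    · subst he; exact c2 i j hij hjn hk
  have le21 : r2 ≤ r1 := by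
    rcases a2 with h | ⟨hk, i, j, hij, hjn, he⟩
    · omega
    · subst he; exact c1 i j hij hjn hk
  omega

theorem pfx_succ {lst : List Int} {m : Nat} {x : Int} {t : List Int}
    (h : lst.drop m = x :: t) : pfx lst (m + 1) = pfx lst m + x := by
  have hx : lst[m]? = some x := by
    rw [← List.head?_drop, h]; rfl
  unfold pfx
  rw [List.take_add_one, hx]
  simp

theorem drop_lt_length {lst : List Int} {m : Nat} {x : Int} {t : List Int}
    (h : lst.drop m = x :: t) : m < lst.length := by
  by_contra hc
  rw [List.drop_eq_nil_of_le (by omega)] at h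
  exact List.cons_ne_nil x t h.symm

-- ---- A side ----

-- full invariant of A's fold state
def InvA (lst : List Int) (k : Int) (m : Nat) (st : Int × List Int × Int) : Prop :=
  st.2.2 = pfx lst m ∧
  st.2.1.Pairwise (· ≤ ·) ∧
  (∀ s : Int, s ∈ st.2.1 ↔ ∃ i : Nat, i ≤ m ∧ s = pfx lst i) ∧
  Reach lst k m st.1

theorem sorted_getElem_mono {l : List Int} (h : l.Pairwise (· ≤ ·))
    {a b : Nat} (hab : a ≤ b) (hb : b < l.length) : l[a]'(by omega) ≤ l[b] := by
  rcases Nat.eq_or_lt_of_le hab with rfl | hlt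
  · exact le_refl _
  · exact (List.pairwise_iff_getElem.mp h) a b (by omega) hb hlt

-- inserting x at bisectLeft l x keeps the list sorted and adds x to its members
theorem insert_bl (l : List Int) (x : Int) (h : l.Pairwise (· ≤ ·)) :
    (PySem.List.insert l ((PySem.List.bisectLeft l x : Nat) : Int) x).Pairwise (· ≤ ·) ∧
    (∀ s : Int, s ∈ PySem.List.insert l ((PySem.List.bisectLeft l x : Nat) : Int) x ↔ s = x ∨ s ∈ l) := by
  obtain ⟨hle, hlt, hge⟩ := PySem.List.bisectLeft_spec l x h
  set p := PySem.List.bisectLeft l x with hp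
  rw [PySem.List.insert_natCast l p x hle]
  constructor
  · rw [List.pairwise_append]
    refine ⟨h.sublist (List.take_sublist _ _), ?_, ?_⟩
    · rw [List.pairwise_cons]
      refine ⟨?_, h.sublist (List.drop_sublist _ _)⟩
      intro y hy
      obtain ⟨i, hi, rfl⟩ := List.mem_iff_getElem.mp hy
      have hb : p + i < l.length := by simp only [List.length_drop] at hi; omega
      rw [List.getElem_drop]
      exact hge (p + i) hb (by omega)
    · intro a ha b hb
      obtain ⟨i, hi, rfl⟩ := List.mem_iff_getElem.mp ha
      have hil : i < l.length := by simp only [List.length_take] at hi; omega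
      have hip : i < p := by simp only [List.length_take] at hi; omega
      have hax : l[i] < x := hlt i hil hip
      have haeq : (List.take p l)[i] = l[i] := List.getElem_take
      rcases List.mem_cons.mp hb with rfl | hbd
      · omega
      · obtain ⟨j, hj, rfl⟩ := List.mem_iff_getElem.mp hbd
        have hjl : p + j < l.length := by simp only [List.length_drop] at hj; omega
        have hbeq : (List.drop p l)[j] = l[p + j] := List.getElem_drop
        have := hge (p + j) hjl (by omega)
        omega
  · intro s
    constructor
    · intro hs
      rcases List.mem_append.mp hs with hs | hs
      · exact Or.inr (List.mem_of_mem_take hs)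
      · rcases List.mem_cons.mp hs with rfl | hs
        · exact Or.inl rfl
        · exact Or.inr (List.mem_of_mem_drop hs)
    · intro hs
      rcases hs with rfl | hs
      · exact List.mem_append.mpr (Or.inr (by simp))
      · rw [← List.take_append_drop p l] at hs
        rcases List.mem_append.mp hs with hs | hs
        · exact List.mem_append.mpr (Or.inl hs)
        · exact List.mem_append.mpr (Or.inr (List.mem_cons_of_mem _ hs))

theorem invA_step (lst : List Int) (k : Int) (m : Nat) (st : Int × List Int × Int)
    (x : Int) (t : List Int) (hd : lst.drop m = x :: t) (hI : InvA lst k m st) :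
    InvA lst k (m + 1) (helperStep k st x) := by
  obtain ⟨hcur, hsort, hmem, hreach⟩ := hI
  obtain ⟨hra, hrb, hrc⟩ := hreach
  have hPsucc : pfx lst (m + 1) = pfx lst m + x := pfx_succ hd
  obtain ⟨hins_sort, hins_mem⟩ := insert_bl st.2.1 (st.2.2 + x) hsort
  have hcur' : st.2.2 + x = pfx lst (m + 1) := by omega
  obtain ⟨hble, hblt, hbge⟩ := PySem.List.bisectLeft_spec st.2.1 (st.2.2 + x - k) hsort
  set i1 := PySem.List.bisectLeft st.2.1 (st.2.2 + x - k) with hi1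
  refine ⟨?_, ?_, ?_, ?_⟩
  · show st.2.2 + x = pfx lst (m + 1)
    exact hcur'
  · show (PySem.List.insert st.2.1 ((PySem.List.bisectLeft st.2.1 (st.2.2 + x) : Nat) : Int)
      (st.2.2 + x)).Pairwise (· ≤ ·)
    exact hins_sort
  · intro s
    show s ∈ PySem.List.insert st.2.1 ((PySem.List.bisectLeft st.2.1 (st.2.2 + x) : Nat) : Int)
      (st.2.2 + x) ↔ _
    rw [hins_mem s, hcur']
    constructor
    · rintro (rfl | hs)
      · exact ⟨m + 1, le_refl _, rfl⟩
      · obtain ⟨i, hi, rfl⟩ := (hmem s).mp hs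
        exact ⟨i, by omega, rfl⟩
    · rintro ⟨i, hi, rfl⟩
      rcases Nat.eq_or_lt_of_le hi with rfl | hlt
      · exact Or.inl rfl
      · exact Or.inr ((hmem _).mpr ⟨i, by omega, rfl⟩)
  · -- Reach for the new res
    show Reach lst k (m + 1)
      (if i1 < st.2.1.length then max st.1 (st.2.2 + x - st.2.1.getD i1 0) else st.1)
    by_cases hcase : i1 < st.2.1.length
    · simp only [if_pos hcase]
      have hgetD : st.2.1.getD i1 0 = st.2.1[i1] := List.getD_eq_getElem _ _ hcase
      have hmem1 : st.2.1[i1] ∈ st.2.1 := List.getElem_mem _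
      obtain ⟨i0, hi0, he0⟩ := (hmem _).mp hmem1
      have hge1 : st.2.2 + x - k ≤ st.2.1[i1] := hbge i1 hcase (le_refl _)
      refine ⟨?_, by omega, ?_⟩
      · rcases max_choice st.1 (st.2.2 + x - st.2.1.getD i1 0) with he | he
        · rw [he]
          rcases hra with h | ⟨hk, i, j, hij, hjn, he2⟩
          · exact Or.inl h
          · exact Or.inr ⟨hk, i, j, hij, by omega, he2⟩
        · rw [he, hgetD, he0]
          rw [he0] at hge1
          exact Or.inr ⟨by omega, i0, m + 1, by omega, le_refl _, by omega⟩
      · intro i j hij hjm hk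
        rcases Nat.eq_or_lt_of_le hjm with rfl | hjlt
        · have hPi : pfx lst i ∈ st.2.1 := (hmem _).mpr ⟨i, by omega, rfl⟩
          obtain ⟨ti, hti, hte⟩ := List.mem_iff_getElem.mp hPi
          have htige : i1 ≤ ti := by
            by_contra hc
            have := hblt ti hti (by omega)
            rw [hte] at this
            omega
          have hmono : st.2.1[i1] ≤ st.2.1[ti] := sorted_getElem_mono hsort htige hti
          rw [hgetD]
          rw [hte] at hmono
          have h1 : pfx lst (m + 1) - pfx lst i ≤ st.2.2 + x - st.2.1[i1] := by omega
          have h2 : st.2.2 + x - st.2.1[i1] ≤ max st.1 (st.2.2 + x - st.2.1[i1]) := le_max_right _ _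
          omega
        · have := hrc i j hij (by omega) hk
          have h2 : st.1 ≤ max st.1 (st.2.2 + x - st.2.1[i1]) := le_max_left _ _
          rw [hgetD]
          omega
    · simp only [if_neg hcase]
      refine ⟨?_, hrb, ?_⟩
      · rcases hra with h | ⟨hk, i, j, hij, hjn, he⟩
        · exact Or.inl h
        · exact Or.inr ⟨hk, i, j, hij, by omega, he⟩
      · intro i j hij hjm hk
        rcases Nat.eq_or_lt_of_le hjm with rfl | hjlt
        · exfalso
          have hPi : pfx lst i ∈ st.2.1 := (hmem _).mpr ⟨i, by omega, rfl⟩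
          obtain ⟨ti, hti, hte⟩ := List.mem_iff_getElem.mp hPi
          have := hblt ti hti (by omega)
          rw [hte] at this
          omega
        · exact hrc i j hij (by omega) hk

theorem invA_fold (lst : List Int) (k : Int) :
    ∀ (t : List Int) (m : Nat) (st : Int × List Int × Int),
      lst.drop m = t → InvA lst k m st →
      InvA lst k (m + t.length) (t.foldl (helperStep k) st) := by
  intro t
  induction t with
  | nil => intro m st _ hI; simpa using hI
  | cons x t' ih =>
      intro m st hd hI
      have hd' : lst.drop (m + 1) = t' := by
        have := congrArg (List.drop 1) hd
        simpa [List.drop_drop, Nat.add_comm] using this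
      have := ih (m + 1) (helperStep k st x) hd' (invA_step lst k m st x t' hd hI)
      simpa [List.foldl_cons, Nat.add_comm, Nat.add_assoc, Nat.add_left_comm] using this

theorem helper_reach (lst : List Int) (k : Int) :
    Reach lst k lst.length (helper lst k) := by
  have hbase : InvA lst k 0 (-2 ^ 31, [0], 0) := by
    refine ⟨rfl, by simp, ?_, Or.inl rfl, le_refl _, by intro i j hij hj0 _; omega⟩
    intro s
    simp only [List.mem_singleton]
    constructor
    · rintro rfl; exact ⟨0, le_refl _, rfl⟩
    · rintro ⟨i, hi, rfl⟩
      interval_cases i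
      rfl
  have := invA_fold lst k lst 0 (-2 ^ 31, [0], 0) (by simp) hbase
  simpa [helper] using this.2.2.2

-- ---- B side ----

-- inner loop: starting at row i with running sum pfx m - pfx i over the suffix lst.drop m
theorem innerB_inv (lst : List Int) (k : Int) (i : Nat) :
    ∀ (t : List Int) (m : Nat) (res : Int), lst.drop m = t → i ≤ m →
      let r := (t.foldl (helperAltInner k) (res, pfx lst m - pfx lst i)).1
      (r = res ∨ (r ≤ k ∧ ∃ j : Nat, i < j ∧ j ≤ lst.length ∧ r = pfx lst j - pfx lst i)) ∧
      res ≤ r ∧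
      (∀ j : Nat, m < j → j ≤ lst.length → pfx lst j - pfx lst i ≤ k → pfx lst j - pfx lst i ≤ r) := by
  intro t
  induction t with
  | nil =>
      intro m res hd _
      have hm : lst.length ≤ m := by
        by_contra hc
        have : lst.drop m ≠ [] := by
          simp [List.drop_eq_nil_iff]
          omega
        exact this hd
      exact ⟨Or.inl rfl, le_refl _, by intro j hj1 hj2 _; omega⟩
  | cons x t' ih =>
      intro m res hd him
      have hd' : lst.drop (m + 1) = t' := by
        have := congrArg (List.drop 1) hd
        simpa [List.drop_drop, Nat.add_comm] using this
      have hP : pfx lst (m + 1) = pfx lst m + x := pfx_succ hd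
      have hmlt : m < lst.length := drop_lt_length hd
      simp only [List.foldl_cons]
      have hstep : helperAltInner k (res, pfx lst m - pfx lst i) x =
          (if pfx lst (m + 1) - pfx lst i ≤ k then max res (pfx lst (m + 1) - pfx lst i) else res,
           pfx lst (m + 1) - pfx lst i) := by
        simp only [helperAltInner, hP]
        ring_nf
      rw [hstep]
      set res' := if pfx lst (m + 1) - pfx lst i ≤ k then max res (pfx lst (m + 1) - pfx lst i) else res with hres'
      obtain ⟨ha, hb, hc⟩ := ih (m + 1) res' hd' (by omega)
      have hresle : res ≤ res' := by
        rw [hres']; split_ifs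
        · exact le_max_left _ _
        · exact le_refl _
      refine ⟨?_, le_trans hresle hb, ?_⟩
      · rcases ha with h | h
        · rw [h, hres']
          split_ifs with hcase
          · rcases max_choice res (pfx lst (m + 1) - pfx lst i) with he | he
            · rw [he]; exact Or.inl rfl
            · rw [he]; exact Or.inr ⟨hcase, m + 1, by omega, by omega, rfl⟩
          · exact Or.inl rfl
        · exact Or.inr h
      · intro j hj1 hj2 hjk
        rcases Nat.lt_or_ge (m + 1) j with hlt | hge
        · exact hc j hlt hj2 hjk
        · have hej : j = m + 1 := by omega
          subst hej
          have hstep2 : pfx lst (m + 1) - pfx lst i ≤ res' := by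
            rw [hres', if_pos hjk]
            exact le_max_right _ _
          exact le_trans hstep2 hb

-- outer loop invariant: reachability always, boundedness for start indices below c
theorem outerB_inv (lst : List Int) (k : Int) :
    ∀ (c : Nat) (res : Int),
      (res = -2 ^ 31 ∨ (res ≤ k ∧ ∃ i j : Nat, i < j ∧ j ≤ lst.length ∧ res = pfx lst j - pfx lst i)) →
      (-2 ^ 31 ≤ res) →
      let r := (List.range c).foldl
        (fun r i => ((lst.drop i).foldl (helperAltInner k) (r, 0)).1) res
      (r = -2 ^ 31 ∨ (r ≤ k ∧ ∃ i j : Nat, i < j ∧ j ≤ lst.length ∧ r = pfx lst j - pfx lst i)) ∧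
      (-2 ^ 31 ≤ r) ∧
      (∀ i j : Nat, i < c → i < j → j ≤ lst.length → pfx lst j - pfx lst i ≤ k →
        pfx lst j - pfx lst i ≤ r) := by
  intro c
  induction c with
  | zero => intro res h1 h2; exact ⟨h1, h2, by intro i j hi; omega⟩
  | succ c ih =>
      intro res h1 h2
      obtain ⟨ihA, ihB, ihC⟩ := ih res h1 h2
      simp only [List.range_succ, List.foldl_append, List.foldl_cons, List.foldl_nil]
      set r0 := (List.range c).foldl (fun r i => ((lst.drop i).foldl (helperAltInner k) (r, 0)).1) res with hr0
      have hzero : (0 : Int) = pfx lst c - pfx lst c := by ring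
      have hin := innerB_inv lst k c (lst.drop c) c r0 rfl (le_refl _)
      rw [← hzero] at hin
      obtain ⟨ha, hb, hc⟩ := hin
      refine ⟨?_, le_trans ihB hb, ?_⟩
      · rcases ha with h | ⟨hk, j, hj1, hj2, he⟩
        · rw [h]; exact ihA
        · exact Or.inr ⟨hk, c, j, hj1, hj2, he⟩
      · intro i j hic hij hjn hjk
        rcases Nat.lt_succ_iff_lt_or_eq.mp hic with hlt | rfl
        · exact le_trans (ihC i j hlt hij hjn hjk) hb
        · exact hc j hij hjn hjk

theorem helper_alt_reach (lst : List Int) (k : Int) :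
    Reach lst k lst.length (helper_alt lst k) := by
  have h := outerB_inv lst k lst.length (-2 ^ 31) (Or.inl rfl) (le_refl _)
  obtain ⟨ha, hb, hc⟩ := h
  unfold helper_alt
  refine ⟨ha, hb, ?_⟩
  intro i j hij hjn hjk
  exact hc i j (by omega) hij hjn hjk

-- ===== VERDICT (by name: the statement is the Claim_ definition above) =====
theorem helper_spec : Claim_equal_helper := by
  intro lst k _
  unfold Spec_helper
  exact reach_unique (helper_reach lst k) (helper_alt_reach lst k)
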